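-- pv_equiv track=rewrite | github.com/jayantsolanki/EPIJudgePython | epi_judge_python/11-01-search_first_key.py | check_prefix
-- ===== SOURCE A (Python) =====
-- from typing import List
--
-- def check_prefix(A: List[str], p: str):
--     left, mid, right, result = 0, 0, len(A) -1 , -1
--     # while left <= right:
--     #     mid = left + (right - left) // 2
--     #     if len(A[mid]) < len(p):#only check if the length are same or word is bigger
--     #         left = mid + 1
--     #     elif p < A[mid][:len(p)]:
--     #         right = mid - 1
--     #     elif p == A[mid][:len(p)]:
--     #         return mid
--     #     else:
--     #         left = mid + 1
--     #above works
--     while left <= right: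
--         mid = left + (right - left) // 2
--         if p < A[mid][:len(p)]:
--             right = mid - 1
--         elif p == A[mid][:len(p)]:
--             return mid
--         else:
--             left = mid + 1
--     #above works
--     #this doesnt work
--     # while left <= right:
--     #     mid = left + (right - left) // 2
--     #     if p < A[mid]:
--     #         right = mid - 1
--     #     elif p == A[mid]:
--     #         return mid
--     #     else:
--     #         left = mid + 1
--     return result
-- ===== SOURCE B (Python) =====
-- def check_prefix(A, p):
--     def go(lo, size):
--         if size == 0:
--             return -1
--         half = (size - 1) // 2
--         mid = lo + half
--         w = A[mid]
--         if w.startswith(p):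
--             return mid
--         if p < w:
--             return go(lo, half)
--         return go(mid + 1, size - half - 1)
--     return go(0, len(A))
-- ===== Notes on version B (the rewrite author's own statement) =====
-- stated objective: alternative
-- what changed: A's iterative left/right while-loop with prefix-slice comparisons is replaced by a recursive helper go(lo, size) over segment start and length in natural numbers, which tests startswith(p) first and compares p against the whole word A[mid] instead of its length-|p| slice; the probed indices are identical, so the returned index is the same.
import Mathlib
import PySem

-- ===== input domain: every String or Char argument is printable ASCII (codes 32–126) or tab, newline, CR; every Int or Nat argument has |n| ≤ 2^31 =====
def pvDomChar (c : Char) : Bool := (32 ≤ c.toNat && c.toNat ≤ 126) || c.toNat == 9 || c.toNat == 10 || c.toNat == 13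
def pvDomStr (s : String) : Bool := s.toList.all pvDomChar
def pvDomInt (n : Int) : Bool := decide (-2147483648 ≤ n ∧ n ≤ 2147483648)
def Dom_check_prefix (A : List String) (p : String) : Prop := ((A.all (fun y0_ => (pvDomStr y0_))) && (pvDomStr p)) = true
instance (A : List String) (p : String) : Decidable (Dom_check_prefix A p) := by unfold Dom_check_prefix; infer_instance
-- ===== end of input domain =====

-- B replaces A's Int left/right while-loop with slice comparisons by a recursion on (lo, size)
-- over Nat that tests startswith and compares whole words; same return value, same cost.

-- ===== PORT A =====
-- the while-loop of A, as structural recursion over the shrinking interval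
def check_prefix_loop (A : List String) (p : String) (left right : Int) : Int :=
  if h : left ≤ right then
    let mid := left + PySem.Int.floordiv (right - left) 2
    let pre := PySem.Str.slice (PySem.List.pyGetD A mid "") none (some (PySem.Str.len p))
    if p < pre then check_prefix_loop A p left (mid - 1)
    else if p = pre then mid
    else check_prefix_loop A p (mid + 1) right
  else -1
termination_by (right + 1 - left).toNat
decreasing_by
  all_goals
    rw [PySem.Int.floordiv_eq_ediv_of_pos (by norm_num : (0:Int) < 2)] at *
    omega

def check_prefix (A : List String) (p : String) : Int :=
  check_prefix_loop A p 0 ((A.length : Int) - 1)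

-- ===== PORT B =====
-- Source B's inner go(lo, size): size of the remaining segment, Nat bookkeeping throughout
def check_prefix_go (A : List String) (p : String) (lo size : Nat) : Int :=
  if _h : size = 0 then -1
  else
    let half := (size - 1) / 2
    let mid := lo + half
    let w := A.getD mid ""
    if PySem.Str.startswith w p then (mid : Int)
    else if p < w then check_prefix_go A p lo half
    else check_prefix_go A p (mid + 1) (size - half - 1)
termination_by size
decreasing_by all_goals omega

def check_prefix_alt (A : List String) (p : String) : Int :=
  check_prefix_go A p 0 A.length

-- ===== PRECONDITION & SPEC =====
def Spec_check_prefix (A : List String) (p : String) (out : Int) : Prop := out = check_prefix_alt A p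
instance (A : List String) (p : String) (out : Int) : Decidable (Spec_check_prefix A p out) := by unfold Spec_check_prefix; infer_instance

-- ===== CLAIM (what is proved, stated in full; the proofs are below) =====
def Claim_equal_check_prefix : Prop := ∀ (A : List String) (p : String), Dom_check_prefix A p → Spec_check_prefix A p (check_prefix A p)

-- ===== LEMMAS AND PROOFS =====

-- when p is not a prefix of w, comparing p with w's length-|p| prefix is comparing p with w
theorem lt_take_iff (p w : List Char) (h : ¬ p <+: w) : p < w.take p.length ↔ p < w := by
  induction p generalizing w with
  | nil => exact absurd (List.nil_prefix) h
  | cons a p ih =>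
    cases w with
    | nil => simp
    | cons b w =>
      simp only [List.length_cons, List.take_succ_cons, List.cons_lt_cons_iff]
      by_cases hab : a = b
      · have hpw : ¬ p <+: w := fun hp => h (by simp [List.cons_prefix_cons, hab, hp])
        rw [ih w hpw]
      · simp [hab]

theorem startswith_iff_eq_pre (w p : String) :
    PySem.Str.startswith w p = true ↔ p = PySem.Str.slice w none (some (PySem.Str.len p)) := by
  rw [String.ext_iff]
  simp [pysem, PySem.Chars.startswith_iff, List.prefix_iff_eq_take]

theorem lt_pre_iff (w p : String) (h : PySem.Str.startswith w p = false) :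
    (p < PySem.Str.slice w none (some (PySem.Str.len p))) ↔ p < w := by
  rw [String.lt_iff_toList_lt, String.lt_iff_toList_lt]
  have hpre : ¬ p.toList <+: w.toList := by
    intro hp
    simp only [pysem] at h
    rw [(PySem.Chars.startswith_iff _ _).mpr hp] at h
    cases h
  have hsl : (PySem.Str.slice w none (some (PySem.Str.len p))).toList
      = w.toList.take p.toList.length := by simp [pysem]
  rw [hsl]
  exact lt_take_iff _ _ hpre

-- A's loop on the interval [lo, lo+size-1] computes B's go on (lo, size)
theorem loop_eq_go (A : List String) (p : String) :
    ∀ size lo : Nat, lo + size ≤ A.length →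
      check_prefix_loop A p (lo : Int) ((lo : Int) + (size : Int) - 1) = check_prefix_go A p lo size := by
  intro size
  induction size using Nat.strong_induction_on with
  | _ size ih =>
    intro lo hle
    match size with
    | 0 =>
      rw [check_prefix_loop, dif_neg (by omega), check_prefix_go]
      simp
    | Nat.succ n =>
      have hmid : (lo : Int) + PySem.Int.floordiv (((lo : Int) + ((n+1 : Nat) : Int) - 1) - lo) 2
          = ((lo + n / 2 : Nat) : Int) := by
        rw [PySem.Int.floordiv_eq_ediv_of_pos (by norm_num : (0:Int) < 2)]
        push_cast
        omega
      have hhalf : n / 2 ≤ n := Nat.div_le_self n 2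
      set midN : Nat := lo + n / 2 with hmidN
      have hw : PySem.List.pyGetD A ((midN : Nat) : Int) "" = A.getD midN "" :=
        PySem.List.pyGetD_natCast A midN ""
      rw [check_prefix_loop, dif_pos (by push_cast; omega), check_prefix_go, dif_neg (Nat.succ_ne_zero n)]
      simp only [hmid, hw, Nat.succ_sub_one, Nat.succ_eq_add_one, ← hmidN]
      set w : String := A.getD midN "" with hwdef
      set pre : String := PySem.Str.slice w none (some (PySem.Str.len p)) with hpre
      cases hsw : PySem.Str.startswith w p with
      | true =>
        have heq : p = pre := (startswith_iff_eq_pre w p).mp hsw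
        rw [if_neg (by rw [heq]; exact lt_irrefl pre), if_pos heq, if_pos rfl]
      | false =>
        have hiff : (p < pre) ↔ p < w := lt_pre_iff w p hsw
        have hne : p ≠ pre := fun hc => by
          rw [(startswith_iff_eq_pre w p).mpr hc] at hsw; cases hsw
        simp only [Bool.false_eq_true, if_false]
        by_cases hpw : p < w
        · rw [if_pos (hiff.mpr hpw), if_pos hpw]
          have h1 : ((midN : Nat) : Int) - 1 = (lo : Int) + ((n / 2 : Nat) : Int) - 1 := by
            push_cast [hmidN]; ring
          rw [h1]
          exact ih (n / 2) (by omega) lo (by omega)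
        · rw [if_neg (fun hc => hpw (hiff.mp hc)), if_neg hne, if_neg hpw]
          have h1 : ((midN : Nat) : Int) + 1 = ((midN + 1 : Nat) : Int) := by push_cast; ring
          have h2 : (lo : Int) + ((n+1 : Nat) : Int) - 1
              = ((midN + 1 : Nat) : Int) + ((n + 1 - (n / 2) - 1 : Nat) : Int) - 1 := by
            push_cast [hmidN]
            omega
          rw [h1, h2]
          exact ih (n + 1 - n / 2 - 1) (by omega) (midN + 1) (by omega)

-- ===== VERDICT (by name: the statement is the Claim_ definition above) =====
theorem check_prefix_spec : Claim_equal_check_prefix := by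
  intro A p _
  unfold Spec_check_prefix check_prefix check_prefix_alt
  have := loop_eq_go A p A.length 0 (by omega)
  simpa using this
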